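-- pv_equiv track=rewrite | github.com/Saptarshi767/Flight_System | src/dashboard/page_modules/nlp_interface.py | categorize_queries
-- ===== SOURCE A (Python) =====
-- def categorize_queries(history: list) -> dict:
--     """Categorize queries for analytics"""
--
--     categories = {
--         'Delay Analysis': 0,
--         'Congestion': 0,
--         'Schedule Optimization': 0,
--         'Network Impact': 0,
--         'General': 0
--     }
--
--     for entry in history:
--         query = entry['query'].lower()
--
--         if 'delay' in query:
--             categories['Delay Analysis'] += 1
--         elif 'congestion' in query or 'busy' in query:
--             categories['Congestion'] += 1
--         elif 'schedule' in query or 'time' in query: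
--             categories['Schedule Optimization'] += 1
--         elif 'network' in query or 'impact' in query:
--             categories['Network Impact'] += 1
--         else:
--             categories['General'] += 1
--
--     return categories
-- ===== SOURCE B (Python) =====
-- def _nmatch(queries, kws):
--     """How many queries contain at least one of the keywords."""
--     return sum(1 for q in queries if any(k in q for k in kws))
--
--
-- def categorize_queries(history: list) -> dict:
--     """Categorize queries for analytics.
--
--     Staged-passes reimplementation: count, for each cumulative union of the
--     keyword groups, how many queries match it; the count of each category is
--     the difference of two consecutive cumulative counts (a query falls in
--     category i iff it matches the i-th union but not the (i-1)-th), and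
--     'General' is the remainder.
--     """
--     queries = [entry['query'].lower() for entry in history]
--     p1 = _nmatch(queries, ['delay'])
--     p2 = _nmatch(queries, ['delay', 'congestion', 'busy'])
--     p3 = _nmatch(queries, ['delay', 'congestion', 'busy', 'schedule', 'time'])
--     p4 = _nmatch(queries, ['delay', 'congestion', 'busy', 'schedule', 'time',
--                            'network', 'impact'])
--     return {
--         'Delay Analysis': p1,
--         'Congestion': p2 - p1,
--         'Schedule Optimization': p3 - p2,
--         'Network Impact': p4 - p3,
--         'General': len(queries) - p4,
--     }
-- ===== Notes on version B (the rewrite author's own statement) =====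
-- stated objective: alternative
-- what changed: Instead of classifying each query by A's first-match if/elif chain and incrementing a dict, B makes staged counting passes over the cumulative unions of the keyword groups and obtains each category count as the difference of two consecutive cumulative match counts (General = total minus the last); it trades one branching pass for several branch-free counting passes.
import Mathlib
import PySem

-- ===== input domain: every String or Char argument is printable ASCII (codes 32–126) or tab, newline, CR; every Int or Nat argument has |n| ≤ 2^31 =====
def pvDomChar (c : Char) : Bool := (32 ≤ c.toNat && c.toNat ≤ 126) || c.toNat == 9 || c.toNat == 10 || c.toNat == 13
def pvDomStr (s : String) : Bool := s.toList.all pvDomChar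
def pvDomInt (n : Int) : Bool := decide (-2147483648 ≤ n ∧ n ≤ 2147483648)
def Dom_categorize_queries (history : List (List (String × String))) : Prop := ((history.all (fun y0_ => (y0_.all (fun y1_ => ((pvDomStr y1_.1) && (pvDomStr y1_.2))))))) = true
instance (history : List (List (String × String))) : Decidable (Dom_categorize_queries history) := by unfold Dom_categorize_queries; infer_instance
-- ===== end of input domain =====

-- B replaces A's per-query if/elif classification by staged counting passes over the
-- cumulative unions of the keyword groups, taking consecutive differences; objective:
-- alternative. Equivalence is over the return value; neither program mutates its argument.

-- ===== PORT A =====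
def categorize_queries (history : List (List (String × String))) : List (String × Int) :=
  let init : PySem.Dict String Int := PySem.Dict.ofList
    [("Delay Analysis", 0), ("Congestion", 0), ("Schedule Optimization", 0),
     ("Network Impact", 0), ("General", 0)]
  let final := history.foldl (fun cats entry =>
    match (PySem.Dict.mk entry).get? "query" with
    | none => cats   -- entry['query'] raises KeyError: excluded by Pre_
    | some qraw =>
      let q := PySem.Str.lower qraw
      if PySem.Str.isIn "delay" q then cats.modify "Delay Analysis" 0 (· + 1)
      else if PySem.Str.isIn "congestion" q || PySem.Str.isIn "busy" q then cats.modify "Congestion" 0 (· + 1)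
      else if PySem.Str.isIn "schedule" q || PySem.Str.isIn "time" q then cats.modify "Schedule Optimization" 0 (· + 1)
      else if PySem.Str.isIn "network" q || PySem.Str.isIn "impact" q then cats.modify "Network Impact" 0 (· + 1)
      else cats.modify "General" 0 (· + 1)) init
  final.items

-- ===== PORT B =====
-- Source B's _nmatch: how many queries contain at least one of the keywords
def pvNMatch (queries : List String) (kws : List String) : Int :=
  (queries.countP (fun q => kws.any (fun k => PySem.Str.isIn k q)) : Int)

def categorize_queries_alt (history : List (List (String × String))) : List (String × Int) :=
  -- the comprehension [entry['query'].lower() for entry in history]; entries missing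
  -- the 'query' key (KeyError in Python) are excluded by Pre_
  let queries := history.filterMap (fun e => ((PySem.Dict.mk e).get? "query").map PySem.Str.lower)
  let p1 := pvNMatch queries ["delay"]
  let p2 := pvNMatch queries ["delay", "congestion", "busy"]
  let p3 := pvNMatch queries ["delay", "congestion", "busy", "schedule", "time"]
  let p4 := pvNMatch queries ["delay", "congestion", "busy", "schedule", "time", "network", "impact"]
  [("Delay Analysis", p1), ("Congestion", p2 - p1), ("Schedule Optimization", p3 - p2),
   ("Network Impact", p4 - p3), ("General", (queries.length : Int) - p4)]

-- ===== PRECONDITION & SPEC =====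
-- Pre_ excludes exactly the entries without a 'query' key, on which A (and B) raise KeyError.
def Pre_categorize_queries (history : List (List (String × String))) : Prop :=
  (history.all (fun entry => (PySem.Dict.mk entry).contains "query")) = true
instance (history : List (List (String × String))) : Decidable (Pre_categorize_queries history) := by unfold Pre_categorize_queries; infer_instance

def pvWitness_categorize_queries : (List (List (String × String))) :=
  [[("query", "Any delays today?")], [("query", "busy airport")]]

def Spec_categorize_queries (history : List (List (String × String))) (out : List (String × Int)) : Prop := out = categorize_queries_alt history
instance (history : List (List (String × String))) (out : List (String × Int)) : Decidable (Spec_categorize_queries history out) := by unfold Spec_categorize_queries; infer_instance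

-- ===== CLAIM (what is proved, stated in full; the proofs are below) =====
def Claim_equal_categorize_queries : Prop := ∀ (history : List (List (String × String))), Dom_categorize_queries history → Pre_categorize_queries history → Spec_categorize_queries history (categorize_queries history)

-- ===== LEMMAS AND PROOFS =====

-- the category A's if/elif chain assigns to a lowered query
def pvCatName (q : String) : String :=
  if PySem.Str.isIn "delay" q then "Delay Analysis"
  else if PySem.Str.isIn "congestion" q || PySem.Str.isIn "busy" q then "Congestion"
  else if PySem.Str.isIn "schedule" q || PySem.Str.isIn "time" q then "Schedule Optimization"
  else if PySem.Str.isIn "network" q || PySem.Str.isIn "impact" q then "Network Impact"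
  else "General"

def pvNames : List String :=
  ["Delay Analysis", "Congestion", "Schedule Optimization", "Network Impact", "General"]

-- categories of the entries whose 'query' key is present
def pvCats (history : List (List (String × String))) : List String :=
  history.filterMap (fun e => ((PySem.Dict.mk e).get? "query").map (fun s => pvCatName (PySem.Str.lower s)))

def pvStep {β γ : Type} (f : γ → β → γ) (c : γ) (o : Option β) : γ :=
  match o with
  | none => c
  | some b => f c b

theorem pv_foldl_match_filterMap {α β γ : Type} (g : α → Option β) (f : γ → β → γ)
    (l : List α) (init : γ) :
    l.foldl (fun c e => pvStep f c (g e)) init = (l.filterMap g).foldl f init := by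
  induction l generalizing init with
  | nil => rfl
  | cons x t ih =>
    cases h : g x with
    | none =>
      simp only [List.foldl_cons, List.filterMap_cons, h, pvStep]
      exact ih init
    | some b =>
      simp only [List.foldl_cons, List.filterMap_cons, h, pvStep]
      exact ih (f init b)

theorem pv_catName_mem (q : String) : pvCatName q ∈ pvNames := by
  unfold pvCatName pvNames
  split_ifs <;> simp

theorem pv_update_of_subset (l s : List String) (h : ∀ x ∈ l, x ∈ s) :
    PySem.Set.update s l = s := by
  induction l generalizing s with
  | nil => rfl
  | cons x t ih =>
    have hx : x ∈ s := h x (by simp)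
    have hadd : PySem.Set.add s x = s := by
      simp [PySem.Set.add, PySem.Set.contains, hx]
    simp only [PySem.Set.update, List.foldl_cons]
    have := ih (PySem.Set.add s x) (fun y hy => by rw [hadd]; exact h y (by simp [hy]))
    simpa [PySem.Set.update, hadd] using this

theorem pv_tally_items (l : List String) (hl : ∀ x ∈ l, x ∈ pvNames) :
    (List.foldl (fun (c : PySem.Dict String Int) n => c.modify n 0 (· + 1))
      (PySem.Dict.ofList
        [("Delay Analysis", 0), ("Congestion", 0), ("Schedule Optimization", 0),
         ("Network Impact", 0), ("General", 0)]) l).items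
      = pvNames.map (fun n => (n, (l.count n : Int))) := by
  have hkeys : (List.foldl (fun (c : PySem.Dict String Int) n => c.modify n 0 (· + 1))
      (PySem.Dict.ofList
        [("Delay Analysis", 0), ("Congestion", 0), ("Schedule Optimization", 0),
         ("Network Impact", 0), ("General", 0)]) l).keys = pvNames := by
    rw [PySem.Dict.keys_foldl_modify]
    have hk0 : (PySem.Dict.ofList
        [("Delay Analysis", 0), ("Congestion", 0), ("Schedule Optimization", 0),
         ("Network Impact", 0), ("General", (0 : Int))]).keys = pvNames := by decide
    rw [hk0]
    exact pv_update_of_subset _ _ hl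
  have hnd : (List.foldl (fun (c : PySem.Dict String Int) n => c.modify n 0 (· + 1))
      (PySem.Dict.ofList
        [("Delay Analysis", 0), ("Congestion", 0), ("Schedule Optimization", 0),
         ("Network Impact", 0), ("General", 0)]) l).keys.Nodup := by
    rw [hkeys]; decide
  rw [PySem.Dict.items_eq_map_keys _ hnd 0, hkeys]
  have hgetD : ∀ n, (List.foldl (fun (c : PySem.Dict String Int) n => c.modify n 0 (· + 1))
      (PySem.Dict.ofList
        [("Delay Analysis", 0), ("Congestion", 0), ("Schedule Optimization", 0),
         ("Network Impact", 0), ("General", 0)]) l).getD n 0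
      = (PySem.Dict.ofList
        [("Delay Analysis", 0), ("Congestion", 0), ("Schedule Optimization", 0),
         ("Network Impact", 0), ("General", (0 : Int))]).getD n 0 + (l.count n : Int) :=
    fun n => PySem.Dict.getD_foldl_modify_add_one _ _ _
  unfold pvNames
  simp only [List.map_cons, List.map_nil, hgetD]
  norm_num
  refine ⟨?_, ?_, ?_, ?_, ?_⟩ <;> decide

-- A's result, characterised as category counts
theorem pv_A_eq (history : List (List (String × String))) :
    categorize_queries history = pvNames.map (fun n => (n, ((pvCats history).count n : Int))) := by
  unfold categorize_queries
  have hstep : (fun (cats : PySem.Dict String Int) (entry : List (String × String)) =>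
      match (PySem.Dict.mk entry).get? "query" with
      | none => cats
      | some qraw =>
        let q := PySem.Str.lower qraw
        if PySem.Str.isIn "delay" q then cats.modify "Delay Analysis" 0 (· + 1)
        else if PySem.Str.isIn "congestion" q || PySem.Str.isIn "busy" q then cats.modify "Congestion" 0 (· + 1)
        else if PySem.Str.isIn "schedule" q || PySem.Str.isIn "time" q then cats.modify "Schedule Optimization" 0 (· + 1)
        else if PySem.Str.isIn "network" q || PySem.Str.isIn "impact" q then cats.modify "Network Impact" 0 (· + 1)
        else cats.modify "General" 0 (· + 1))
      = (fun cats entry =>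
        pvStep (fun (c : PySem.Dict String Int) n => c.modify n 0 (· + 1)) cats
          (((PySem.Dict.mk entry).get? "query").map (fun s => pvCatName (PySem.Str.lower s)))) := by
    funext cats entry
    cases h : (PySem.Dict.mk entry).get? "query" with
    | none => rfl
    | some qraw =>
      simp only [Option.map_some, pvStep]
      unfold pvCatName
      split_ifs <;> rfl
  simp only [hstep]
  rw [pv_foldl_match_filterMap
      (g := fun e => ((PySem.Dict.mk e).get? "query").map (fun s => pvCatName (PySem.Str.lower s)))
      (f := fun (c : PySem.Dict String Int) n => c.modify n 0 (· + 1))]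
  exact pv_tally_items _ (fun x hx => by
    rcases List.mem_filterMap.mp hx with ⟨e, _, he⟩
    rcases Option.map_eq_some_iff.mp he with ⟨w, _, rfl⟩
    exact pv_catName_mem _)

-- the five count identities between cumulative matches and A's categories
theorem pvL1 (qs : List String) :
    (qs.map pvCatName).count "Delay Analysis"
      = qs.countP (fun q => PySem.Str.isIn "delay" q) := by
  induction qs with
  | nil => rfl
  | cons q t ih =>
    simp only [List.countP_cons, List.map_cons, List.count_cons, pvCatName]
    split_ifs <;> simp_all

theorem pvL2 (qs : List String) :
    qs.countP (fun q => PySem.Str.isIn "delay" q || (PySem.Str.isIn "congestion" q || (PySem.Str.isIn "busy" q)))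
      = qs.countP (fun q => PySem.Str.isIn "delay" q) + (qs.map pvCatName).count "Congestion" := by
  induction qs with
  | nil => rfl
  | cons q t ih =>
    simp only [List.countP_cons, List.map_cons, List.count_cons, pvCatName]
    split_ifs <;> simp_all <;> omega

theorem pvL3 (qs : List String) :
    qs.countP (fun q => PySem.Str.isIn "delay" q || (PySem.Str.isIn "congestion" q || (PySem.Str.isIn "busy" q || (PySem.Str.isIn "schedule" q || (PySem.Str.isIn "time" q)))))
      = qs.countP (fun q => PySem.Str.isIn "delay" q || (PySem.Str.isIn "congestion" q || (PySem.Str.isIn "busy" q))) + (qs.map pvCatName).count "Schedule Optimization" := by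
  induction qs with
  | nil => rfl
  | cons q t ih =>
    simp only [List.countP_cons, List.map_cons, List.count_cons, pvCatName]
    split_ifs <;> simp_all <;> omega

theorem pvL4 (qs : List String) :
    qs.countP (fun q => PySem.Str.isIn "delay" q || (PySem.Str.isIn "congestion" q || (PySem.Str.isIn "busy" q || (PySem.Str.isIn "schedule" q || (PySem.Str.isIn "time" q || (PySem.Str.isIn "network" q || (PySem.Str.isIn "impact" q)))))))
      = qs.countP (fun q => PySem.Str.isIn "delay" q || (PySem.Str.isIn "congestion" q || (PySem.Str.isIn "busy" q || (PySem.Str.isIn "schedule" q || (PySem.Str.isIn "time" q))))) + (qs.map pvCatName).count "Network Impact" := by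
  induction qs with
  | nil => rfl
  | cons q t ih =>
    simp only [List.countP_cons, List.map_cons, List.count_cons, pvCatName]
    split_ifs <;> simp_all <;> omega

theorem pvL5 (qs : List String) :
    qs.length
      = qs.countP (fun q => PySem.Str.isIn "delay" q || (PySem.Str.isIn "congestion" q || (PySem.Str.isIn "busy" q || (PySem.Str.isIn "schedule" q || (PySem.Str.isIn "time" q || (PySem.Str.isIn "network" q || (PySem.Str.isIn "impact" q))))))) + (qs.map pvCatName).count "General" := by
  induction qs with
  | nil => rfl
  | cons q t ih =>
    simp only [List.countP_cons, List.map_cons, List.count_cons, List.length_cons, pvCatName]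
    split_ifs <;> simp_all <;> omega

theorem pv_cats_eq (history : List (List (String × String))) :
    pvCats history
      = (history.filterMap (fun e => ((PySem.Dict.mk e).get? "query").map PySem.Str.lower)).map pvCatName := by
  unfold pvCats
  rw [List.map_filterMap]
  simp [Option.map_map, Function.comp_def]

-- ===== VERDICT (by name: the statement is the Claim_ definition above) =====
theorem categorize_queries_spec : Claim_equal_categorize_queries := by
  intro history _ _
  unfold Spec_categorize_queries categorize_queries_alt pvNMatch
  rw [pv_A_eq, pv_cats_eq]
  simp only [pvNames, List.map_cons, List.map_nil, List.any_cons, List.any_nil, Bool.or_false,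
    List.cons.injEq, Prod.mk.injEq]
  set qs := history.filterMap (fun e => ((PySem.Dict.mk e).get? "query").map PySem.Str.lower) with hqs
  have h1 := pvL1 qs
  have h2 := pvL2 qs
  have h3 := pvL3 qs
  have h4 := pvL4 qs
  have h5 := pvL5 qs
  refine ⟨⟨trivial, ?_⟩, ⟨trivial, ?_⟩, ⟨trivial, ?_⟩, ⟨trivial, ?_⟩, ⟨trivial, ?_⟩, trivial⟩ <;> omega
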